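-- pv_equiv track=rewrite | github.com/ChullEPG/taxi-survey | taxi_survey.py | extract_responses_value_counts
-- ===== SOURCE A (Python) =====
-- def extract_responses_value_counts(column):
--     '''
--     Extract responses from a column with multiple answers per row and return a dictionary of counts
--     '''
--     all_responses = []
--     for response in column:
--         if isinstance(response, str):
--             split_responses = response.split(';')
--             all_responses.extend([r.strip() for r in split_responses])
--     unique_responses = list(set(all_responses))
--     unique_responses = [r for r in unique_responses if r != '']
--     counts = {response: all_responses.count(response) for response in unique_responses}
--     return counts
-- ===== SOURCE B (Python) =====
-- def extract_responses_value_counts(column):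
--     '''
--     Extract responses from a column with multiple answers per row and return a dictionary of counts
--     '''
--     counts = {}
--     for response in column:
--         if isinstance(response, str):
--             for part in response.split(';'):
--                 token = part.strip()
--                 if token != '':
--                     counts[token] = counts.get(token, 0) + 1
--     return counts
-- ===== Notes on version B (the rewrite author's own statement) =====
-- stated objective: faster
-- what changed: Replaces A's three-pass scheme (collect all tokens, dedupe via set, then call all_responses.count once per unique token) with a single pass that increments a per-token counter dict as tokens are produced, dropping empty tokens on the fly.
import Mathlib
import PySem

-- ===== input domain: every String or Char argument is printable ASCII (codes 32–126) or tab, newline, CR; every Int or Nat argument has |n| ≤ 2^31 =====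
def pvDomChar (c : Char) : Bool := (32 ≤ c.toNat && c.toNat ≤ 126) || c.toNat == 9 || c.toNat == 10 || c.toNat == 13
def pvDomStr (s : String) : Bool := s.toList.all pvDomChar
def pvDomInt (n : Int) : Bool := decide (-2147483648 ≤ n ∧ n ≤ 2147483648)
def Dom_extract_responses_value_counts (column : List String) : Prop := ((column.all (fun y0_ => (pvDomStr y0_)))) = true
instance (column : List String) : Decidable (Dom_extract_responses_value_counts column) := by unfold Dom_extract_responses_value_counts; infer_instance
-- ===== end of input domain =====

-- B replaces A's set-dedup + one `list.count` scan per unique token with a single counting pass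
-- over the tokens (objective: faster, O(N) instead of O(U*N)).

-- ===== PORT A =====
-- response.split(';') stripped: shared tokenization helper (both Pythons compute exactly this;
-- split? is `some` here since the separator ";" is non-empty)
def pvTokens (response : String) : List String :=
  ((PySem.Str.split? response ";").getD []).map PySem.Str.strip

def extract_responses_value_counts (column : List String) : List (String × Int) :=
  -- all_responses accumulation loop (isinstance(response, str) is always true: column : List String)
  let all_responses := column.foldl (fun acc response => acc ++ pvTokens response) []
  -- list(set(all_responses))
  let unique_responses := PySem.Set.ofList all_responses
  -- [r for r in unique_responses if r != '']
  let unique_responses := unique_responses.filter (fun r => r != "")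
  -- {response: all_responses.count(response) for response in unique_responses} (distinct keys, insertion order)
  unique_responses.map (fun response => (response, (all_responses.count response : Int)))

-- ===== PORT B =====
def extract_responses_value_counts_alt (column : List String) : List (String × Int) :=
  (column.foldl (fun counts response =>
      (pvTokens response).foldl (fun counts token =>
          if token != "" then counts.modify token 0 (· + 1) else counts)
        counts)
    PySem.Dict.empty).items

-- ===== PRECONDITION & SPEC =====
def Spec_extract_responses_value_counts (column : List String) (out : List (String × Int)) : Prop := out = extract_responses_value_counts_alt column
instance (column : List String) (out : List (String × Int)) : Decidable (Spec_extract_responses_value_counts column out) := by unfold Spec_extract_responses_value_counts; infer_instance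

-- ===== CLAIM (what is proved, stated in full; the proofs are below) =====
def Claim_equal_extract_responses_value_counts : Prop := ∀ (column : List String), Dom_extract_responses_value_counts column → Spec_extract_responses_value_counts column (extract_responses_value_counts column)

-- ===== LEMMAS AND PROOFS =====

-- First-occurrence dedup commutes with filter.
theorem pv_ofList_filter {α : Type} [BEq α] [LawfulBEq α] (p : α → Bool) (xs : List α) :
    PySem.Set.ofList (xs.filter p) = (PySem.Set.ofList xs).filter p := by
  suffices h : ∀ (s : PySem.Set α),
      (xs.filter p).foldl PySem.Set.add (s.filter p) = (xs.foldl PySem.Set.add s).filter p by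
    simpa [PySem.Set.ofList, PySem.Set.empty] using h []
  induction xs with
  | nil => intro s; simp
  | cons x xs ih =>
    intro s
    by_cases hp : p x = true
    · rw [List.filter_cons_of_pos hp, List.foldl_cons, List.foldl_cons]
      have hadd : PySem.Set.add (List.filter p s) x = List.filter p (PySem.Set.add s x) := by
        simp only [PySem.Set.add]
        by_cases h : x ∈ s <;> simp [h, List.filter_append, hp, List.mem_filter]
      rw [hadd]
      exact ih (PySem.Set.add s x)
    · rw [List.filter_cons_of_neg hp, List.foldl_cons]
      have hadd : List.filter p (PySem.Set.add s x) = List.filter p s := by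
        simp only [PySem.Set.add]
        by_cases h : x ∈ s <;> simp [h, List.filter_append, hp]
      rw [← hadd]
      exact ih (PySem.Set.add s x)

-- B's loop over the whole column is the Counter of the non-empty tokens of the flattened column.
theorem pv_alt_eq_counter (column : List String) :
    extract_responses_value_counts_alt column
      = (PySem.Dict.counter ((column.flatMap pvTokens).filter (fun t => t != ""))).items := by
  unfold extract_responses_value_counts_alt
  rw [PySem.Dict.counter_eq_foldl, List.foldl_filter, List.foldl_flatMap]

-- ===== VERDICT (by name: the statement is the Claim_ definition above) =====
theorem extract_responses_value_counts_spec : Claim_equal_extract_responses_value_counts := by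
  intro column _
  show extract_responses_value_counts column = extract_responses_value_counts_alt column
  rw [pv_alt_eq_counter, PySem.Dict.items_counter, pv_ofList_filter]
  unfold extract_responses_value_counts
  rw [PySem.List.foldl_append_eq_flatMap pvTokens column []]
  simp only [List.nil_append]
  apply List.map_congr_left
  intro r hr
  have hp : (fun t => t != "") r = true := (List.mem_filter.mp hr).2
  rw [List.count_filter (p := fun t => t != "") (a := r) hp]
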